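-- pv_equiv track=rewrite | github.com/luciengaitskell/Website-SST | index.py | fileDateNumbOrgainise
-- ===== SOURCE A (Python) =====
-- def findBetween(inputString, findString, lowerBound, upperBound=False):
-- 	if upperBound == False:
-- 		upperBound=len(inputString)
--
-- 	if lowerBound > upperBound: # if lower bound is larger
-- 		stupidVar = upperBound
-- 		upperBound = lowerBound
-- 		lowerBound = stupidVar
--
-- 	if upperBound > len(inputString):
-- 		upperBound = len(inputString)
--
-- 	if lowerBound > len(inputString):
-- 		lowerBound = upperBound
--
-- 	inputString=inputString[lowerBound:upperBound]
-- 	returnAmount=inputString.find(findString)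
-- 	if not returnAmount == -1:
-- 		returnAmount = returnAmount + lowerBound
--
-- 	return returnAmount
--
-- def fileDateNumbOrgainise(fileNames, theFileBeginning, theFileExtention):
-- 	uniqueDates=[]
-- 	fileNamesSorted=[]
-- 	dates=[]
--
-- 	for ii in fileNames:
-- 		dates.append(ii[len(theFileBeginning):int(findBetween(ii,"-", len(theFileBeginning)+1))])
--
-- 	for ii in range(len(fileNames)): # for each file
-- 		newDate= dates[ii] # Date of the file
-- 		dateNew=True
-- 		for jj in uniqueDates: # Finding if the date of the file is new
-- 			if jj == newDate:
-- 				dateNew=False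
--
-- 		if dateNew == True:
-- 			uniqueDates.append(newDate) # adding file date if its good
--
-- 	uniqueDates.sort(reverse=True) # sorting the dates so the latest ones are first
--
-- 	for ii in range(len(uniqueDates)):
--
-- 		fileNamesNew=[]
--
-- 		for jj in range(len(fileNames)):
-- 			#return "jj: " + jj + " | returned: " + str(findBetween(jj, "-", len(theFileBeginning)))
-- 			#return (jj)[len(theFileBeginning):findBetween(jj, "-", len(theFileBeginning))]
-- 			#return "uniqueDates: " + str(uniqueDates) + " | " + (jj)[len(theFileBeginning):findBetween(jj, "-", len(theFileBeginning))]
-- 			if uniqueDates[ii] == dates[jj]: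
-- 				fileNamesNew.append((fileNames[jj])[len(theFileBeginning):len(fileNames[jj])-len(theFileExtention)])
--
-- 		fileNamesNew.sort(reverse=True)
--
-- 		for jj in fileNamesNew:
-- 			fileNamesSorted.append(str(theFileBeginning) + str(jj) + str(theFileExtention))
--
-- 	return fileNamesSorted
-- ===== SOURCE B (Python) =====
-- def findBetween(inputString, findString, lowerBound, upperBound=False):
-- 	if upperBound == False:
-- 		upperBound=len(inputString)
--
-- 	if lowerBound > upperBound: # if lower bound is larger
-- 		stupidVar = upperBound
-- 		upperBound = lowerBound
-- 		lowerBound = stupidVar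
--
-- 	if upperBound > len(inputString):
-- 		upperBound = len(inputString)
--
-- 	if lowerBound > len(inputString):
-- 		lowerBound = upperBound
--
-- 	inputString=inputString[lowerBound:upperBound]
-- 	returnAmount=inputString.find(findString)
-- 	if not returnAmount == -1:
-- 		returnAmount = returnAmount + lowerBound
--
-- 	return returnAmount
--
-- def fileDateNumbOrgainise(fileNames, theFileBeginning, theFileExtention):
-- 	# One composite-key sort instead of dedup + per-date rescans + per-date sorts.
-- 	pairs = []
-- 	for fn in fileNames:
-- 		date = fn[len(theFileBeginning):int(findBetween(fn, "-", len(theFileBeginning)+1))]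
-- 		middle = fn[len(theFileBeginning):len(fn)-len(theFileExtention)]
-- 		pairs.append((date, middle))
-- 	pairs.sort(reverse=True)
-- 	return [theFileBeginning + middle + theFileExtention for _, middle in pairs]
-- ===== Notes on version B (the rewrite author's own statement) =====
-- stated objective: simpler
-- what changed: Replaces the manual unique-date dedup, the per-date rescan of all files and the per-date sorts by building one (date, middle) pair list and sorting it once with a composite key in reverse, then mapping back to filenames.
import Mathlib
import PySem

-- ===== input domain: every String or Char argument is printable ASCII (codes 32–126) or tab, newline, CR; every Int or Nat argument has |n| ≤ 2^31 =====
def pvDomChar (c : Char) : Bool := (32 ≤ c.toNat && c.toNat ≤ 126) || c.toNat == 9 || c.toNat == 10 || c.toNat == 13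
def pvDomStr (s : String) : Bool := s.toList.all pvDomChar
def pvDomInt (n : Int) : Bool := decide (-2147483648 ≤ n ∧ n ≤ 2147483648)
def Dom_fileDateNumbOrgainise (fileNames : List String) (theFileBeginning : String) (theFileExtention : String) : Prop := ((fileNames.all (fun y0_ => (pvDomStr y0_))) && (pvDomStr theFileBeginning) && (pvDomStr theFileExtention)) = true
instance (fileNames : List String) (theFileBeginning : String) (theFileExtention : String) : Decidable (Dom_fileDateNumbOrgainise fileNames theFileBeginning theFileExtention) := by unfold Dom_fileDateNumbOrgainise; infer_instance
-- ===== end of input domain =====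

-- B replaces A's dedup-then-rescan-per-date structure by one composite-key sort of (date, middle)
-- pairs ("simpler"); return values are proved identical on every input.

-- ===== PORT A =====
-- Shared module-level helper (identical source in Source A and Source B).  The Python default
-- 'upperBound=False' is modelled as 0 (Python's 'upperBound == False' is True exactly for
-- False and 0; every call in this module uses the default).
def findBetween (inputString : List Char) (findString : List Char) (lowerBound : Int) (upperBound : Int) : Int :=
  let upperBound : Int := if upperBound == 0 then (inputString.length : Int) else upperBound
  let lu : Int × Int :=
    if lowerBound > upperBound then (upperBound, lowerBound) else (lowerBound, upperBound)
  let lowerBound := lu.1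
  let upperBound := lu.2
  let upperBound : Int := if upperBound > (inputString.length : Int) then (inputString.length : Int) else upperBound
  let lowerBound : Int := if lowerBound > (inputString.length : Int) then upperBound else lowerBound
  let inputString := PySem.Chars.slice inputString (some lowerBound) (some upperBound)
  let returnAmount := PySem.Chars.find inputString findString
  if ¬ (returnAmount == -1) then returnAmount + lowerBound else returnAmount

def fileDateNumbOrgainise (fileNames : List String) (theFileBeginning : String) (theFileExtention : String) : List String :=
  let fns : List (List Char) := fileNames.map String.toList
  let b : List Char := theFileBeginning.toList
  let e : List Char := theFileExtention.toList
  let dates : List (List Char) := fns.foldl (fun acc ii =>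
      acc ++ [PySem.Chars.slice ii (some (b.length : Int)) (some (findBetween ii ['-'] ((b.length : Int) + 1) 0))]) []
  let uniqueDates : List (List Char) :=
    (PySem.List.pyRange 0 (PySem.List.len fns)).foldl (fun ud ii =>
      let newDate := PySem.List.pyGetD dates ii []
      let dateNew := ud.foldl (fun dn jj => if jj = newDate then false else dn) true
      if dateNew then ud ++ [newDate] else ud) []
  let uniqueDates := PySem.List.sorted uniqueDates (fun x => x) true
  (PySem.List.pyRange 0 (PySem.List.len uniqueDates)).foldl (fun fs ii =>
      let fileNamesNew : List (List Char) :=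
        (PySem.List.pyRange 0 (PySem.List.len fns)).foldl (fun fnn jj =>
          if PySem.List.pyGetD uniqueDates ii [] = PySem.List.pyGetD dates jj [] then
            fnn ++ [PySem.Chars.slice (PySem.List.pyGetD fns jj []) (some (b.length : Int))
                      (some (((PySem.List.pyGetD fns jj []).length : Int) - (e.length : Int)))]
          else fnn) []
      let fileNamesNew := PySem.List.sorted fileNamesNew (fun x => x) true
      fileNamesNew.foldl (fun fs jj => fs ++ [String.ofList (b ++ jj ++ e)]) fs) []

-- ===== PORT B =====
def fileDateNumbOrgainise_alt (fileNames : List String) (theFileBeginning : String) (theFileExtention : String) : List String :=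
  let b : List Char := theFileBeginning.toList
  let e : List Char := theFileExtention.toList
  let pairs : List (List Char × List Char) := fileNames.map (fun fn0 =>
      let fn := fn0.toList
      (PySem.Chars.slice fn (some (b.length : Int)) (some (findBetween fn ['-'] ((b.length : Int) + 1) 0)),
       PySem.Chars.slice fn (some (b.length : Int)) (some ((fn.length : Int) - (e.length : Int)))))
  let pairs := PySem.List.sorted2 pairs Prod.fst Prod.snd true
  pairs.map (fun t => String.ofList (b ++ t.2 ++ e))

-- ===== PRECONDITION & SPEC =====
def Spec_fileDateNumbOrgainise (fileNames : List String) (theFileBeginning : String) (theFileExtention : String) (out : List String) : Prop := out = fileDateNumbOrgainise_alt fileNames theFileBeginning theFileExtention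
instance (fileNames : List String) (theFileBeginning : String) (theFileExtention : String) (out : List String) : Decidable (Spec_fileDateNumbOrgainise fileNames theFileBeginning theFileExtention out) := by unfold Spec_fileDateNumbOrgainise; infer_instance

-- ===== CLAIM (what is proved, stated in full; the proofs are below) =====
def Claim_equal_fileDateNumbOrgainise : Prop := ∀ (fileNames : List String) (theFileBeginning : String) (theFileExtention : String), Dom_fileDateNumbOrgainise fileNames theFileBeginning theFileExtention → Spec_fileDateNumbOrgainise fileNames theFileBeginning theFileExtention (fileDateNumbOrgainise fileNames theFileBeginning theFileExtention)

-- ===== LEMMAS AND PROOFS =====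

-- the date slice and the middle slice, exactly as both ports compute them
def dOf (b : List Char) (fn : List Char) : List Char :=
  PySem.Chars.slice fn (some (b.length : Int)) (some (findBetween fn ['-'] ((b.length : Int) + 1) 0))

def mOf (b e : List Char) (fn : List Char) : List Char :=
  PySem.Chars.slice fn (some (b.length : Int)) (some ((fn.length : Int) - (e.length : Int)))

-- the per-date list of middles, in file order (A's inner jj loop)
def midsOf (b e : List Char) (fns : List (List Char)) (d : List Char) : List (List Char) :=
  (fns.filter (fun fn => decide (d = dOf b fn))).map (mOf b e)

-- A's dedup loop followed by the reverse sort
def uniqOf (b : List Char) (fns : List (List Char)) : List (List Char) :=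
  PySem.List.sorted
    (fns.foldl (fun ud fn => if (!ud.contains (dOf b fn)) = true then ud ++ [dOf b fn] else ud) [])
    (fun x => x) true

lemma slice_nil (a c : Option Int) : PySem.Chars.slice [] a c = [] := by
  simp [PySem.Chars.slice, PySem.List.slice]

lemma dOf_nil (b : List Char) : dOf b [] = [] := slice_nil _ _

lemma pyGetD_map_dOf (b : List Char) (fns : List (List Char)) (i : Int) :
    PySem.List.pyGetD (fns.map (dOf b)) i [] = dOf b (PySem.List.pyGetD fns i []) := by
  conv_lhs => rw [← dOf_nil b]
  exact PySem.List.pyGetD_map (dOf b) fns i []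

-- A's innermost membership loop is a (negated) membership test
lemma foldl_dateNew (x : List Char) :
    ∀ (ud : List (List Char)) (dn : Bool),
      ud.foldl (fun dn jj => if jj = x then false else dn) dn = (dn && !ud.contains x) := by
  intro ud
  induction ud with
  | nil => simp
  | cons y ys ih =>
    intro dn
    simp only [List.foldl_cons]
    by_cases h : y = x
    · rw [if_pos h, ih false]; simp [h]
    · rw [if_neg h, ih dn]; simp [show ¬ x = y from fun he => h he.symm]

-- A's dedup loop keeps each date once (we only need nodup + membership)
lemma dedupFold_nodup (g : List Char → List Char) :
    ∀ (l : List (List Char)) (acc : List (List Char)), acc.Nodup →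
      (l.foldl (fun ud fn => if (!ud.contains (g fn)) = true then ud ++ [g fn] else ud) acc).Nodup := by
  intro l
  induction l with
  | nil => intro acc h; simpa using h
  | cons x xs ih =>
    intro acc h
    by_cases hm : g x ∈ acc
    · simp only [List.foldl_cons]; rw [if_neg (by simp [hm])]; exact ih acc h
    · simp only [List.foldl_cons]; rw [if_pos (by simp [hm])]
      refine ih _ ?_
      rw [List.nodup_append]
      refine ⟨h, List.nodup_singleton _, ?_⟩
      intro a ha c hc heq
      rw [List.mem_singleton] at hc
      subst hc; subst heq; exact hm ha

lemma dedupFold_mem (g : List Char → List Char) :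
    ∀ (l : List (List Char)) (acc : List (List Char)) (y : List Char),
      (y ∈ l.foldl (fun ud fn => if (!ud.contains (g fn)) = true then ud ++ [g fn] else ud) acc ↔
        (y ∈ acc ∨ y ∈ l.map g)) := by
  intro l
  induction l with
  | nil => simp
  | cons x xs ih =>
    intro acc y
    by_cases hm : g x ∈ acc
    · simp only [List.foldl_cons]; rw [if_neg (by simp [hm])]
      rw [ih]
      constructor
      · rintro (h | h) <;> simp [h]
      · rintro (h | h)
        · exact Or.inl h
        · rcases List.mem_map.mp h with ⟨z, hz, rfl⟩
          rcases List.mem_cons.mp hz with rfl | hz'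
          · exact Or.inl hm
          · exact Or.inr (List.mem_map_of_mem hz')
    · simp only [List.foldl_cons]; rw [if_pos (by simp [hm])]
      rw [ih]; simp [or_assoc, or_comm, or_left_comm]

lemma uniqOf_nodup (b : List Char) (fns : List (List Char)) : (uniqOf b fns).Nodup := by
  rw [uniqOf]
  exact ((PySem.List.sorted_perm _ _ _).symm).nodup (dedupFold_nodup (dOf b) fns [] List.nodup_nil)

lemma uniqOf_pairwise (b : List Char) (fns : List (List Char)) :
    (uniqOf b fns).Pairwise (fun a c => c < a) := by
  have h1 : (uniqOf b fns).Pairwise (fun a c => c ≤ a) := by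
    rw [uniqOf]
    convert PySem.List.sorted_pairwise_rev (κ := List Char)
      (fns.foldl (fun ud fn => if (!ud.contains (dOf b fn)) = true then ud ++ [dOf b fn] else ud) [])
      (fun x => x) using 2
  have h2 : (uniqOf b fns).Pairwise (fun a c => a ≠ c) := uniqOf_nodup b fns
  exact (h1.and h2).imp (fun h => lt_of_le_of_ne h.1 (Ne.symm h.2))

lemma uniqOf_mem (b : List Char) (fns : List (List Char)) (d : List Char) :
    d ∈ uniqOf b fns ↔ d ∈ fns.map (dOf b) := by
  rw [uniqOf, PySem.List.mem_sorted, dedupFold_mem]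
  simp

-- pointwise-congruence helpers for flatMap
lemma flatMap_congr_mem {A B : Type} :
    ∀ (l : List A) (f g : A → List B), (∀ x ∈ l, f x = g x) → l.flatMap f = l.flatMap g := by
  intro l f g h
  induction l with
  | nil => simp
  | cons x xs ih =>
    simp only [List.flatMap_cons]
    rw [h x (by simp), ih (fun y hy => h y (by simp [hy]))]

lemma flatMap_perm_congr {A B : Type} :
    ∀ (l : List A) (f g : A → List B), (∀ x ∈ l, (f x).Perm (g x)) →
      (l.flatMap f).Perm (l.flatMap g) := by
  intro l f g h
  induction l with
  | nil => simp
  | cons x xs ih =>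
    simp only [List.flatMap_cons]
    exact (h x (by simp)).append (ih (fun y hy => h y (by simp [hy])))

-- partitioning a list by the (nodup, covering) list of its keys is a permutation
lemma perm_flatMap_filter {A K : Type} [DecidableEq K] (key : A → K) :
    ∀ (ds : List K), ds.Nodup → ∀ (xs : List A), (∀ x ∈ xs, key x ∈ ds) →
      (ds.flatMap (fun d => xs.filter (fun x => decide (d = key x)))).Perm xs := by
  intro ds
  induction ds with
  | nil =>
    intro _ xs h
    rcases xs with _ | ⟨x, xs⟩
    · simp
    · exact absurd (h x (by simp)) (by simp)
  | cons d ds ih =>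
    intro hnd xs h
    simp only [List.flatMap_cons]
    have hrest : ∀ d' ∈ ds, xs.filter (fun x => decide (d' = key x))
        = (xs.filter (fun x => !decide (d = key x))).filter (fun x => decide (d' = key x)) := by
      intro d' hd'
      rw [List.filter_filter]
      apply List.filter_congr
      intro x _
      by_cases hx : d' = key x
      · have : ¬ d = key x := fun hh =>
          (List.nodup_cons.mp hnd).1 (by rw [show d = d' from hh.trans hx.symm]; exact hd')
        simp [hx, this]
      · simp [hx]
    have hfm : ds.flatMap (fun d' => xs.filter (fun x => decide (d' = key x)))
        = ds.flatMap (fun d' =>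
            (xs.filter (fun x => !decide (d = key x))).filter (fun x => decide (d' = key x))) := by
      exact flatMap_congr_mem ds _ _ hrest
    rw [hfm]
    have hperm := ih (List.nodup_cons.mp hnd).2 (xs.filter (fun x => !decide (d = key x))) ?_
    · exact (hperm.append_left _).trans (List.filter_append_perm _ xs)
    · intro x hx
      rcases List.mem_filter.mp hx with ⟨hx1, hx2⟩
      rcases List.mem_cons.mp (h x hx1) with h1 | h1
      · simp [h1] at hx2
      · exact h1

-- sorted2 is sorted by the lexicographic product key
lemma sorted2_eq_sorted_lex (xs : List (List Char × List Char)) (rev : Bool) :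
    PySem.List.sorted2 xs Prod.fst Prod.snd rev
      = PySem.List.sorted xs (fun x => toLex (x.1, x.2)) rev := by
  unfold PySem.List.sorted2 PySem.List.sorted
  have h : (fun a b : List Char × List Char =>
        decide (a.1 < b.1) || (!decide (b.1 < a.1) && decide (a.2 < b.2)))
      = (fun a b : List Char × List Char => decide (toLex (a.1, a.2) < toLex (b.1, b.2))) := by
    funext a b
    rcases lt_trichotomy a.1 b.1 with h | h | h
    · simp [Prod.Lex.toLex_lt_toLex, h]
    · simp [Prod.Lex.toLex_lt_toLex, h]
    · simp [Prod.Lex.toLex_lt_toLex, h, not_lt.mpr (le_of_lt h)]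
      exact fun he => absurd he (ne_of_gt h)
  rw [h]

-- CORE: B's single composite-key reverse sort equals A's per-date decomposition
lemma core (b e : List Char) (fns : List (List Char)) :
    PySem.List.sorted2 (fns.map (fun fn => (dOf b fn, mOf b e fn))) Prod.fst Prod.snd true
      = (uniqOf b fns).flatMap (fun d =>
          (PySem.List.sorted (midsOf b e fns d) (fun x => x) true).map (fun m => (d, m))) := by
  rw [sorted2_eq_sorted_lex]
  set pairs : List (List Char × List Char) := fns.map (fun fn => (dOf b fn, mOf b e fn)) with hpairs
  have hblock : ∀ d ∈ uniqOf b fns,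
      ((PySem.List.sorted (midsOf b e fns d) (fun x => x) true).map (fun m => (d, m))).Perm
        (pairs.filter (fun p => decide (d = p.1))) := by
    intro d _
    have h1 : ((PySem.List.sorted (midsOf b e fns d) (fun x => x) true).map (fun m => (d, m))).Perm
        ((midsOf b e fns d).map (fun m => (d, m))) :=
      (PySem.List.sorted_perm _ _ _).map _
    have h2 : (midsOf b e fns d).map (fun m => (d, m))
        = pairs.filter (fun p => decide (d = p.1)) := by
      rw [midsOf, List.map_map, hpairs, List.filter_map]
      have hc : ((fun p : List Char × List Char => decide (d = p.1)) ∘ fun fn => (dOf b fn, mOf b e fn))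
          = fun fn => decide (d = dOf b fn) := rfl
      rw [hc]
      apply List.map_congr_left
      intro fn hfn
      have hd := (List.mem_filter.mp hfn).2
      simp only [decide_eq_true_eq] at hd
      simp [Function.comp, ← hd]
    rw [← h2] at *
    exact h1
  have hperm : ((uniqOf b fns).flatMap (fun d =>
      (PySem.List.sorted (midsOf b e fns d) (fun x => x) true).map (fun m => (d, m)))).Perm pairs := by
    refine (flatMap_perm_congr _ _ _ hblock).trans ?_
    refine perm_flatMap_filter Prod.fst (uniqOf b fns) (uniqOf_nodup b fns) pairs ?_
    intro p hp
    rcases List.mem_map.mp hp with ⟨fn, hfn, rfl⟩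
    exact (uniqOf_mem b fns _).mpr (List.mem_map_of_mem hfn)
  refine List.Perm.eq_of_pairwise
    (le := fun p q : List Char × List Char => toLex (q.1, q.2) ≤ toLex (p.1, p.2)) ?_ ?_ ?_ ?_
  · intro a c _ _ h1 h2
    have he : toLex (a.1, a.2) = toLex (c.1, c.2) := le_antisymm h2 h1
    have hac := toLex.injective he
    calc a = (a.1, a.2) := (Prod.mk.eta).symm
    _ = (c.1, c.2) := hac
    _ = c := Prod.mk.eta
  · exact PySem.List.sorted_pairwise_rev _ _
  · rw [List.pairwise_flatMap]
    constructor
    · intro d _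
      rw [List.pairwise_map]
      have h2 : (PySem.List.sorted (midsOf b e fns d) (fun x => x) true).Pairwise
          (fun a c : List Char => c ≤ a) := by
        convert PySem.List.sorted_pairwise_rev (κ := List Char) (midsOf b e fns d) (fun x => x) using 2
      refine h2.imp ?_
      intro a c hca
      exact Prod.Lex.toLex_le_toLex.mpr (Or.inr ⟨rfl, hca⟩)
    · refine (uniqOf_pairwise b fns).imp ?_
      intro d1 d2 hlt x hx y hy
      rcases List.mem_map.mp hx with ⟨mx, _, rfl⟩
      rcases List.mem_map.mp hy with ⟨my, _, rfl⟩
      exact Prod.Lex.toLex_le_toLex.mpr (Or.inl hlt)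
  · exact (PySem.List.sorted_perm _ _ _).trans hperm.symm

-- A's inner jj loop collects the middles of the files of one date
lemma midsFold_eq (b e d : List Char) :
    ∀ (l : List (List Char)) (acc : List (List Char)),
      l.foldl (fun fnn x => if d = dOf b x then
          fnn ++ [PySem.Chars.slice x (some (b.length : Int)) (some ((x.length : Int) - (e.length : Int)))]
        else fnn) acc
      = acc ++ (l.filter (fun x => decide (d = dOf b x))).map (mOf b e) := by
  intro l
  induction l with
  | nil => simp
  | cons x xs ih =>
    intro acc
    simp only [List.foldl_cons, List.filter_cons]
    by_cases h : d = dOf b x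
    · rw [if_pos h, ih]
      simp [h, mOf, List.append_assoc]
    · rw [if_neg h, ih]
      simp [h]

-- A's dedup loop over range(len(fns)) equals uniqOf
lemma uniq_eq (b : List Char) (fns : List (List Char)) :
    PySem.List.sorted
      ((PySem.List.pyRange 0 (PySem.List.len fns)).foldl (fun ud ii =>
        if (!ud.contains (dOf b (PySem.List.pyGetD fns ii []))) = true
        then ud ++ [dOf b (PySem.List.pyGetD fns ii [])] else ud) [])
      (fun x => x) true
    = uniqOf b fns := by
  rw [uniqOf]
  exact congrArg (fun l => PySem.List.sorted l (fun x => x) true)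
    (PySem.List.foldl_pyRange_pyGetD fns []
      (fun ud x => if (!ud.contains (dOf b x)) = true then ud ++ [dOf b x] else ud) [] (le_refl 0))

-- A's inner jj loop over range(len(fns)) collects the middles of one date, in file order
lemma inner_eq (b e d : List Char) (fns : List (List Char)) :
    (PySem.List.pyRange 0 (PySem.List.len fns)).foldl (fun fnn jj =>
        if d = dOf b (PySem.List.pyGetD fns jj []) then
          fnn ++ [PySem.Chars.slice (PySem.List.pyGetD fns jj []) (some (b.length : Int))
                    (some (((PySem.List.pyGetD fns jj []).length : Int) - (e.length : Int)))]
        else fnn) []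
    = midsOf b e fns d := by
  refine (PySem.List.foldl_pyRange_pyGetD fns []
    (fun fnn x => if d = dOf b x then
        fnn ++ [PySem.Chars.slice x (some (b.length : Int)) (some ((x.length : Int) - (e.length : Int)))]
      else fnn) [] (le_refl 0)).trans ?_
  exact (midsFold_eq b e d _ []).trans (List.nil_append _)

-- A's outer ii loop over range(len(uniq))
lemma phase3 (b e : List Char) (fns : List (List Char)) (uniq : List (List Char)) :
    (PySem.List.pyRange 0 (PySem.List.len uniq)).foldl (fun fs ii =>
      (PySem.List.sorted ((PySem.List.pyRange 0 (PySem.List.len fns)).foldl (fun fnn jj =>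
          if PySem.List.pyGetD uniq ii [] = dOf b (PySem.List.pyGetD fns jj []) then
            fnn ++ [PySem.Chars.slice (PySem.List.pyGetD fns jj []) (some (b.length : Int))
                      (some (((PySem.List.pyGetD fns jj []).length : Int) - (e.length : Int)))]
          else fnn) []) (fun x => x) true).foldl
        (fun fs jj => fs ++ [String.ofList (b ++ jj ++ e)]) fs) []
    = uniq.flatMap (fun d =>
        (PySem.List.sorted (midsOf b e fns d) (fun x => x) true).map
          (fun m => String.ofList (b ++ m ++ e))) := by
  refine (PySem.List.foldl_pyRange_pyGetD uniq []
    (fun fs d =>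
      (PySem.List.sorted ((PySem.List.pyRange 0 (PySem.List.len fns)).foldl (fun fnn jj =>
          if d = dOf b (PySem.List.pyGetD fns jj []) then
            fnn ++ [PySem.Chars.slice (PySem.List.pyGetD fns jj []) (some (b.length : Int))
                      (some (((PySem.List.pyGetD fns jj []).length : Int) - (e.length : Int)))]
          else fnn) []) (fun x => x) true).foldl
        (fun fs jj => fs ++ [String.ofList (b ++ jj ++ e)]) fs) [] (le_refl 0)).trans ?_
  simp only [inner_eq]
  simp only [PySem.List.foldl_append_singleton_eq_map]
  rw [PySem.List.foldl_append_eq_flatMap, List.nil_append]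
  rfl

-- A's port, normalised
lemma A_norm (fileNames : List String) (B E : String) :
    fileDateNumbOrgainise fileNames B E
      = (uniqOf B.toList (fileNames.map String.toList)).flatMap (fun d =>
          (PySem.List.sorted (midsOf B.toList E.toList (fileNames.map String.toList) d) (fun x => x) true).map
            (fun m => String.ofList (B.toList ++ m ++ E.toList))) := by
  simp only [fileDateNumbOrgainise]
  rw [PySem.List.foldl_append_singleton_eq_map, List.nil_append]
  simp only [foldl_dateNew, Bool.true_and]
  rw [show (fun ii : List Char => PySem.Chars.slice ii (some (B.toList.length : Int))
        (some (findBetween ii ['-'] ((B.toList.length : Int) + 1) 0))) = dOf B.toList from rfl]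
  simp only [pyGetD_map_dOf]
  rw [uniq_eq]
  exact phase3 B.toList E.toList (fileNames.map String.toList) (uniqOf B.toList (fileNames.map String.toList))

-- B's port, normalised
lemma B_norm (fileNames : List String) (B E : String) :
    fileDateNumbOrgainise_alt fileNames B E
      = (PySem.List.sorted2
          ((fileNames.map String.toList).map (fun fn => (dOf B.toList fn, mOf B.toList E.toList fn)))
          Prod.fst Prod.snd true).map (fun t => String.ofList (B.toList ++ t.2 ++ E.toList)) := by
  simp only [fileDateNumbOrgainise_alt]
  rw [List.map_map]
  rfl

-- ===== VERDICT (by name: the statement is the Claim_ definition above) =====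
theorem fileDateNumbOrgainise_spec : Claim_equal_fileDateNumbOrgainise := by
  intro fileNames B E _
  unfold Spec_fileDateNumbOrgainise
  rw [A_norm, B_norm, core, List.map_flatMap]
  refine flatMap_congr_mem _ _ _ ?_
  intro d _
  rw [List.map_map]
  rfl
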